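-- pv_equiv track=rewrite | github.com/kaprakash90/Python | fibo.py | fibo_str
-- ===== SOURCE A (Python) =====
-- def fibo_str(N):
--     assert N>=0
--     l=[]
--     for i in range(0,N+1):
--         if i in (1,0):
--             l.append(i)
--         else:
--             l.append(l[i-1]+l[i-2])
--     l=map(str,l)
--     return ', '.join(l)
-- ===== SOURCE B (Python) =====
-- def fibo_str(N):
--     assert N >= 0
--
--     def fib_pair(k):
--         # (F(k), F(k+1)) by fast doubling: divide and conquer on the index
--         if k == 0:
--             return (0, 1)
--         a, b = fib_pair(k >> 1)
--         c = a * (2 * b - a)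
--         d = a * a + b * b
--         if k & 1:
--             return (d, c + d)
--         return (c, d)
--
--     return ', '.join(str(fib_pair(i)[0]) for i in range(N + 1))
-- ===== Notes on version B (the rewrite author's own statement) =====
-- stated objective: alternative
-- what changed: Each term is computed independently by the fast-doubling recursion on a halved index (F(2k), F(2k+1) from F(k), F(k+1)) instead of any forward list/rolling iteration, then the terms are joined.
import Mathlib
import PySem

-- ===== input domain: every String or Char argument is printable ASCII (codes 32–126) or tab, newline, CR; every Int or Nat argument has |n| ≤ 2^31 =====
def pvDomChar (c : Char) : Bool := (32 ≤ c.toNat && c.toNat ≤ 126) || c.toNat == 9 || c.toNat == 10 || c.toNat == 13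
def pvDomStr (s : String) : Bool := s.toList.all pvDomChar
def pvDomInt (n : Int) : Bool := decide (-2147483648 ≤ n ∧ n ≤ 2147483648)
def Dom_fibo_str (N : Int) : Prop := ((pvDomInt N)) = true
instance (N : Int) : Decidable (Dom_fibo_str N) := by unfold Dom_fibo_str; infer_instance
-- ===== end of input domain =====

-- B computes every term independently by the fast-doubling recursion on a halved index
-- instead of A's forward list iteration with backward lookups; same ', '-joined string.

-- ===== PORT A =====
-- the pyGetD defaults are never used: l has length i when l[i-1], l[i-2] are read
def fibo_str (N : Int) : String :=
  let l := (PySem.List.pyRange 0 (N + 1) 1).foldl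
    (fun l i =>
      if i = 1 ∨ i = 0 then l ++ [i]
      else l ++ [PySem.List.pyGetD l (i - 1) 0 + PySem.List.pyGetD l (i - 2) 0]) []
  PySem.Str.join ", " (l.map PySem.Int.toStr)

-- ===== PORT B =====
-- (F(k), F(k+1)) by fast doubling; k in Python is a nonnegative int, so Nat
def fibPair (k : Nat) : Int × Int :=
  if h : k = 0 then (0, 1)
  else
    let p := fibPair (k / 2)
    let a := p.1
    let b := p.2
    let c := a * (2 * b - a)
    let d := a * a + b * b
    if k % 2 = 1 then (d, c + d) else (c, d)
decreasing_by exact Nat.div_lt_self (Nat.pos_of_ne_zero h) (by norm_num)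

def fibo_str_alt (N : Int) : String :=
  PySem.Str.join ", "
    ((PySem.List.pyRange 0 (N + 1) 1).map (fun i => PySem.Int.toStr (fibPair i.toNat).1))

-- ===== PRECONDITION & SPEC =====
-- the Python A asserts N >= 0 and raises AssertionError otherwise
def Pre_fibo_str (N : Int) : Prop := 0 ≤ N
instance (N : Int) : Decidable (Pre_fibo_str N) := by unfold Pre_fibo_str; infer_instance
def pvWitness_fibo_str : Int := (5)

def Spec_fibo_str (N : Int) (out : String) : Prop := out = fibo_str_alt N
instance (N : Int) (out : String) : Decidable (Spec_fibo_str N out) := by unfold Spec_fibo_str; infer_instance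

-- ===== CLAIM (what is proved, stated in full; the proofs are below) =====
def Claim_equal_fibo_str : Prop := ∀ (N : Int), Dom_fibo_str N → Pre_fibo_str N → Spec_fibo_str N (fibo_str N)

-- ===== LEMMAS AND PROOFS =====

-- B side: fast doubling computes consecutive Fibonacci numbers
theorem fibPair_eq (k : Nat) : fibPair k = ((Nat.fib k : Int), (Nat.fib (k + 1) : Int)) := by
  induction k using Nat.strong_induction_on with
  | _ k ih =>
    rw [fibPair]
    by_cases h : k = 0
    · simp [h]
    · simp only [h, dif_neg, not_false_iff]
      rw [ih (k / 2) (Nat.div_lt_self (Nat.pos_of_ne_zero h) (by norm_num))]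
      rcases Nat.even_or_odd k with he | ho
      · obtain ⟨m, rfl⟩ := he
        have h2 : m + m = 2 * m := by ring
        have hdiv : (m + m) / 2 = m := by omega
        have hmod : ¬ (m + m) % 2 = 1 := by omega
        simp only [hdiv, hmod, if_neg, not_false_iff, Prod.mk.injEq]
        have hle : Nat.fib m ≤ 2 * Nat.fib (m + 1) :=
          le_trans Nat.fib_le_fib_succ (by omega)
        constructor
        · rw [h2, Nat.fib_two_mul]
          push_cast [hle]
          ring
        · have h21 : m + m + 1 = 2 * m + 1 := by ring
          rw [h21, Nat.fib_two_mul_add_one]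
          push_cast
          ring
      · obtain ⟨m, rfl⟩ := ho
        have hdiv : (2 * m + 1) / 2 = m := by omega
        have hmod : (2 * m + 1) % 2 = 1 := by omega
        simp only [hdiv, hmod, if_pos, Prod.mk.injEq]
        constructor
        · rw [Nat.fib_two_mul_add_one]
          push_cast
          ring
        · have hle : Nat.fib m ≤ 2 * Nat.fib (m + 1) :=
            le_trans Nat.fib_le_fib_succ (by omega)
          rw [show 2 * m + 1 + 1 = 2 * m + 2 from rfl, Nat.fib_add_two,
            Nat.fib_two_mul, Nat.fib_two_mul_add_one]
          push_cast [hle]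
          ring

-- (a, b) after k advances from (0, 1): A's invariant values
def fibAux : Nat → Int × Int
  | 0 => (0, 1)
  | k + 1 => ((fibAux k).2, (fibAux k).1 + (fibAux k).2)

theorem fibAux_eq (k : Nat) : fibAux k = ((Nat.fib k : Int), (Nat.fib (k + 1) : Int)) := by
  induction k with
  | zero => rfl
  | succ k ih =>
    simp only [fibAux, ih, Prod.mk.injEq]
    refine ⟨trivial, ?_⟩
    rw [Nat.fib_add_two]
    push_cast
    ring

-- the list A has built after the first n iterations
def fibList : Nat → List Int
  | 0 => []
  | n + 1 => fibList n ++ [(fibAux n).1]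

theorem fibList_length (n : Nat) : (fibList n).length = n := by
  induction n with
  | zero => rfl
  | succ n ih => simp [fibList, ih]

theorem fibList_get (n j : Nat) (h : j < n) :
    (fibList n).getD j 0 = (fibAux j).1 := by
  induction n with
  | zero => omega
  | succ n ih =>
    by_cases hj : j < n
    · have hl : j < (fibList n).length := by rw [fibList_length]; omega
      rw [fibList, List.getD_eq_getElem?_getD, List.getElem?_append_left hl,
        ← List.getD_eq_getElem?_getD]
      exact ih hj
    · have : j = n := by omega
      subst this
      simp [fibList, List.getD_eq_getElem?_getD, fibList_length]

theorem foldA_eq (n : Nat) :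
    (PySem.List.pyRange 0 (n : Int) 1).foldl
      (fun l i =>
        if i = 1 ∨ i = 0 then l ++ [i]
        else l ++ [PySem.List.pyGetD l (i - 1) 0 + PySem.List.pyGetD l (i - 2) 0]) []
    = fibList n := by
  induction n with
  | zero => simp [PySem.List.pyRange_one_eq_nil, fibList]
  | succ n ih =>
    have hsplit : PySem.List.pyRange 0 ((n : Int) + 1) 1
        = PySem.List.pyRange 0 (n : Int) 1 ++ [(n : Int)] :=
      PySem.List.pyRange_one_succ_right (by positivity)
    push_cast
    rw [hsplit, List.foldl_append, ih]
    simp only [List.foldl_cons, List.foldl_nil]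
    match n with
    | 0 => simp [fibList, fibAux]
    | 1 => simp [fibList, fibAux]
    | m + 2 =>
      push_cast
      have h1 : ¬(((m : Int) + 2) = 1 ∨ ((m : Int) + 2) = 0) := by omega
      have e1 : PySem.List.pyGetD (fibList (m + 2)) ((m : Int) + 2 - 1) 0
          = (fibAux (m + 1)).1 := by
        have : ((m : Int) + 2 - 1) = ((m + 1 : Nat) : Int) := by push_cast; ring
        rw [this, PySem.List.pyGetD_natCast, fibList_get _ _ (by omega)]
      have e2 : PySem.List.pyGetD (fibList (m + 2)) ((m : Int) + 2 - 2) 0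
          = (fibAux m).1 := by
        have : ((m : Int) + 2 - 2) = ((m : Nat) : Int) := by push_cast; ring
        rw [this, PySem.List.pyGetD_natCast, fibList_get _ _ (by omega)]
      rw [if_neg h1, e1, e2]
      have : (fibAux (m + 1)).1 + (fibAux m).1 = (fibAux (m + 2)).1 := by
        simp [fibAux]; ring
      rw [this]
      rfl

-- A's list elementwise is Nat.fib, hence equals B's per-index fast-doubled terms
theorem fibList_eq_map (n : Nat) :
    (fibList n).map PySem.Int.toStr
      = (PySem.List.pyRange 0 (n : Int) 1).map (fun i => PySem.Int.toStr (fibPair i.toNat).1) := by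
  induction n with
  | zero => simp [fibList, PySem.List.pyRange_one_eq_nil]
  | succ n ih =>
    have hsplit : PySem.List.pyRange 0 ((n : Int) + 1) 1
        = PySem.List.pyRange 0 (n : Int) 1 ++ [(n : Int)] :=
      PySem.List.pyRange_one_succ_right (by positivity)
    push_cast
    rw [hsplit, List.map_append, ← ih, fibList]
    simp [fibAux_eq, fibPair_eq]

-- ===== VERDICT (by name: the statement is the Claim_ definition above) =====
theorem fibo_str_spec : Claim_equal_fibo_str := by
  intro N _ hpre
  unfold Spec_fibo_str fibo_str fibo_str_alt
  obtain ⟨n, rfl⟩ : ∃ n : Nat, N = (n : Int) := ⟨N.toNat, (Int.toNat_of_nonneg hpre).symm⟩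
  have hfold := foldA_eq (n + 1)
  push_cast at hfold
  rw [hfold]
  have h := fibList_eq_map (n + 1)
  push_cast at h
  show PySem.Str.join ", " ((fibList (n + 1)).map PySem.Int.toStr) = _
  rw [h]
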